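-- pv_equiv track=rewrite | github.com/AbdullahDiallo/Agent-ia | app/services/docs.py | _tags_declare_other_language
-- ===== SOURCE A (Python) =====
-- from typing import Iterable, List, Optional
--
-- _LANG_CODES = {"fr", "en", "wo"}
--
-- def _tags_match_language(tags: set[str], preferred_lang: Optional[str]) -> bool:
--     lang = str(preferred_lang or "").strip().lower()
--     if lang not in _LANG_CODES:
--         return False
--     return any(
--         tag == lang
--         or tag == f"lang:{lang}"
--         or tag.endswith(f":{lang}")
--         or tag.endswith(f"_{lang}")
--         for tag in tags
--     )
--
-- def _tags_declare_other_language(tags: set[str], preferred_lang: Optional[str]) -> bool: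
--     lang = str(preferred_lang or "").strip().lower()
--     if lang not in _LANG_CODES:
--         return False
--     for candidate in _LANG_CODES - {lang}:
--         if _tags_match_language(tags, candidate):
--             return True
--     return False
-- ===== SOURCE B (Python) =====
-- from typing import Optional
--
-- _LANG_CODES = {"fr", "en", "wo"}
--
-- def _tags_declare_other_language(tags: set[str], preferred_lang: Optional[str]) -> bool:
--     lang = str(preferred_lang or "").strip().lower()
--     if lang not in _LANG_CODES:
--         return False
--     others = [c for c in sorted(_LANG_CODES) if c != lang]
--     suffixes = tuple(sep + c for c in others for sep in (":", "_"))
--     return any(tag in others or tag.endswith(suffixes) for tag in tags)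
-- ===== Notes on version B (the rewrite author's own statement) =====
-- stated objective: idiomatic
-- what changed: Replaces A's loop over candidate codes with full helper rescans of the tag set per candidate (re-normalising and re-validating each candidate) by one pass over the tags testing membership in the other-codes list and str.endswith against a precomputed suffix tuple, dropping the redundant 'lang:'-prefix clause subsumed by the ':' suffix test.
import Mathlib
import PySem

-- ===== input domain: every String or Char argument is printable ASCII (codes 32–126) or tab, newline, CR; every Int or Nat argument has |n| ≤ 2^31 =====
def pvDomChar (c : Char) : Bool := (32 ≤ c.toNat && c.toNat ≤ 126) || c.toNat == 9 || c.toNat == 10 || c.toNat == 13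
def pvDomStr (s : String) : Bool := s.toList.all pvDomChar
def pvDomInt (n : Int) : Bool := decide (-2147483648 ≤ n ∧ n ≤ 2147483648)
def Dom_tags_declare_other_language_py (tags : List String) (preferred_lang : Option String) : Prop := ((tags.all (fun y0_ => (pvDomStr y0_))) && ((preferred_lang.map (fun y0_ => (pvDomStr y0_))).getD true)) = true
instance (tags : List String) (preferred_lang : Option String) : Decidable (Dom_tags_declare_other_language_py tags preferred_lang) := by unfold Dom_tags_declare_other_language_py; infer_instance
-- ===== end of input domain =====

-- B replaces A's per-candidate helper rescans over the tag set by one pass over the tags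
-- against a precomputed suffix tuple (idiomatic; same return value everywhere).

-- ===== PORT A =====
-- lang = str(preferred_lang or "").strip().lower()   (shared first line of both sources)
def pyPrefLang (preferred_lang : Option String) : String :=
  PySem.Str.lower (PySem.Str.strip (preferred_lang.getD ""))

-- _tags_match_language
def pyTagsMatchLanguage (tags : List String) (preferred_lang : Option String) : Bool :=
  let lang := pyPrefLang preferred_lang
  if !(["fr", "en", "wo"].contains lang) then false
  else tags.any (fun tag =>
    tag == lang || tag == ("lang:" ++ lang) ||
    PySem.Str.endswith tag (":" ++ lang) || PySem.Str.endswith tag ("_" ++ lang))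

-- _tags_declare_other_language (set difference ported as a filter of the code list;
-- the loop returns True as soon as one candidate matches, i.e. List.any)
def tags_declare_other_language_py (tags : List String) (preferred_lang : Option String) : Bool :=
  let lang := pyPrefLang preferred_lang
  if !(["fr", "en", "wo"].contains lang) then false
  else (["fr", "en", "wo"].filter (· != lang)).any
        (fun candidate => pyTagsMatchLanguage tags (some candidate))

-- ===== PORT B =====
def tags_declare_other_language_py_alt (tags : List String) (preferred_lang : Option String) : Bool :=
  let lang := pyPrefLang preferred_lang
  if !(["fr", "en", "wo"].contains lang) then false
  else
    -- others = [c for c in sorted(_LANG_CODES) if c != lang]; sorted({"fr","en","wo"}) = ["en","fr","wo"]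
    let others := ["en", "fr", "wo"].filter (· != lang)
    let suffixes := others.flatMap (fun c => [":" ++ c, "_" ++ c])
    tags.any (fun tag => others.contains tag || suffixes.any (fun suf => PySem.Str.endswith tag suf))

-- ===== PRECONDITION & SPEC =====
def Spec_tags_declare_other_language_py (tags : List String) (preferred_lang : Option String) (out : Bool) : Prop := out = tags_declare_other_language_py_alt tags preferred_lang
instance (tags : List String) (preferred_lang : Option String) (out : Bool) : Decidable (Spec_tags_declare_other_language_py tags preferred_lang out) := by unfold Spec_tags_declare_other_language_py; infer_instance

-- ===== CLAIM (what is proved, stated in full; the proofs are below) =====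
def Claim_equal_tags_declare_other_language_py : Prop := ∀ (tags : List String) (preferred_lang : Option String), Dom_tags_declare_other_language_py tags preferred_lang → Spec_tags_declare_other_language_py tags preferred_lang (tags_declare_other_language_py tags preferred_lang)

-- ===== LEMMAS AND PROOFS =====

-- any f || any g over the same list is any of the pointwise disjunction
theorem pv_two_any {f1 f2 g : String → Bool} (h : ∀ t, (f1 t || f2 t) = g t) (tags : List String) :
    (tags.any f1 || tags.any f2) = tags.any g := by
  induction tags with
  | nil => rfl
  | cons t ts ih =>
    simp only [List.any_cons]
    rw [← h t, ← ih]
    cases f1 t <;> cases f2 t <;> cases ts.any f1 <;> cases ts.any f2 <;> simp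

-- the per-tag match condition: A's four clauses per candidate equal B's membership-or-suffix
-- test (the clause tag == "lang:"++c is subsumed by the suffix ":"++c)
theorem pv_per_tag (t a b : String)
    (ha : PySem.Str.endswith ("lang:" ++ a) (":" ++ a) = true)
    (hb : PySem.Str.endswith ("lang:" ++ b) (":" ++ b) = true) :
    ((t == a || t == ("lang:" ++ a) || PySem.Str.endswith t (":" ++ a) || PySem.Str.endswith t ("_" ++ a)) ||
     (t == b || t == ("lang:" ++ b) || PySem.Str.endswith t (":" ++ b) || PySem.Str.endswith t ("_" ++ b)))
  = ((t == a || t == b) ||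
     (PySem.Str.endswith t (":" ++ a) || PySem.Str.endswith t ("_" ++ a) ||
      PySem.Str.endswith t (":" ++ b) || PySem.Str.endswith t ("_" ++ b))) := by
  by_cases h1 : t = "lang:" ++ a
  · subst h1
    have hA : (("lang:" ++ a) == ("lang:" ++ a)) = true := by simp
    simp only [hA, ha, Bool.or_true, Bool.true_or]
  · by_cases h2 : t = "lang:" ++ b
    · subst h2
      have hB : (("lang:" ++ b) == ("lang:" ++ b)) = true := by simp
      simp only [hB, hb, Bool.or_true, Bool.true_or]
    · have e1 : (t == "lang:" ++ a) = false := by simp [h1]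
      have e2 : (t == "lang:" ++ b) = false := by simp [h2]
      rw [e1, e2]
      cases t == a <;> cases t == b <;>
        cases PySem.Str.endswith t (":" ++ a) <;> cases PySem.Str.endswith t ("_" ++ a) <;>
        cases PySem.Str.endswith t (":" ++ b) <;> cases PySem.Str.endswith t ("_" ++ b) <;> simp

-- same, with B's two codes in the opposite order (used for lang = "wo")
theorem pv_per_tag' (t a b : String)
    (ha : PySem.Str.endswith ("lang:" ++ a) (":" ++ a) = true)
    (hb : PySem.Str.endswith ("lang:" ++ b) (":" ++ b) = true) :
    ((t == a || t == ("lang:" ++ a) || PySem.Str.endswith t (":" ++ a) || PySem.Str.endswith t ("_" ++ a)) ||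
     (t == b || t == ("lang:" ++ b) || PySem.Str.endswith t (":" ++ b) || PySem.Str.endswith t ("_" ++ b)))
  = ((t == b || t == a) ||
     (PySem.Str.endswith t (":" ++ b) || PySem.Str.endswith t ("_" ++ b) ||
      PySem.Str.endswith t (":" ++ a) || PySem.Str.endswith t ("_" ++ a))) := by
  by_cases h1 : t = "lang:" ++ a
  · subst h1
    have hA : (("lang:" ++ a) == ("lang:" ++ a)) = true := by simp
    simp only [hA, ha, Bool.or_true, Bool.true_or]
  · by_cases h2 : t = "lang:" ++ b
    · subst h2
      have hB : (("lang:" ++ b) == ("lang:" ++ b)) = true := by simp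
      simp only [hB, hb, Bool.or_true, Bool.true_or]
    · have e1 : (t == "lang:" ++ a) = false := by simp [h1]
      have e2 : (t == "lang:" ++ b) = false := by simp [h2]
      rw [e1, e2]
      cases t == a <;> cases t == b <;>
        cases PySem.Str.endswith t (":" ++ a) <;> cases PySem.Str.endswith t ("_" ++ a) <;>
        cases PySem.Str.endswith t (":" ++ b) <;> cases PySem.Str.endswith t ("_" ++ b) <;> simp

-- pyTagsMatchLanguage at an actual language code c (its own guard re-normalises and re-checks c)
theorem pv_helper (tags : List String) (c : String)
    (h1 : PySem.Str.lower (PySem.Str.strip c) = c)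
    (h2 : (["fr", "en", "wo"].contains c) = true) :
    pyTagsMatchLanguage tags (some c) = tags.any (fun tag =>
      tag == c || tag == ("lang:" ++ c) ||
      PySem.Str.endswith tag (":" ++ c) || PySem.Str.endswith tag ("_" ++ c)) := by
  unfold pyTagsMatchLanguage pyPrefLang
  simp only [Option.getD_some, h1, h2, Bool.not_true, Bool.false_eq_true, if_false]

-- the two ports agree for every already-normalised language string l
set_option maxRecDepth 4096 in
theorem pv_main (tags : List String) (l : String) :
    (if !(["fr", "en", "wo"].contains l) then false
     else (["fr", "en", "wo"].filter (· != l)).any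
        (fun candidate => pyTagsMatchLanguage tags (some candidate)))
  = (if !(["fr", "en", "wo"].contains l) then false
     else
       tags.any (fun tag =>
         (["en", "fr", "wo"].filter (· != l)).contains tag ||
         ((["en", "fr", "wo"].filter (· != l)).flatMap (fun c => [":" ++ c, "_" ++ c])).any
           (fun suf => PySem.Str.endswith tag suf))) := by
  by_cases hc : (["fr", "en", "wo"].contains l) = true
  · rw [hc]
    simp only [Bool.not_true, Bool.false_eq_true, if_false]
    have hl : l = "fr" ∨ l = "en" ∨ l = "wo" := by simpa using hc
    rcases hl with h | h | h
    · subst h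
      rw [show (["fr", "en", "wo"].filter (· != "fr")) = ["en", "wo"] from by decide,
          show (["en", "fr", "wo"].filter (· != "fr")) = ["en", "wo"] from by decide]
      simp only [List.any_cons, List.any_nil, Bool.or_false, List.flatMap_cons, List.flatMap_nil,
                 List.cons_append, List.nil_append, List.append_nil]
      rw [pv_helper tags "en" (by decide) (by decide), pv_helper tags "wo" (by decide) (by decide)]
      refine pv_two_any (fun t => ?_) tags
      simp only [List.contains_cons, List.contains_nil, Bool.or_false]
      simpa only [Bool.or_assoc] using pv_per_tag t "en" "wo" (by decide) (by decide)
    · subst h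
      rw [show (["fr", "en", "wo"].filter (· != "en")) = ["fr", "wo"] from by decide,
          show (["en", "fr", "wo"].filter (· != "en")) = ["fr", "wo"] from by decide]
      simp only [List.any_cons, List.any_nil, Bool.or_false, List.flatMap_cons, List.flatMap_nil,
                 List.cons_append, List.nil_append, List.append_nil]
      rw [pv_helper tags "fr" (by decide) (by decide), pv_helper tags "wo" (by decide) (by decide)]
      refine pv_two_any (fun t => ?_) tags
      simp only [List.contains_cons, List.contains_nil, Bool.or_false]
      simpa only [Bool.or_assoc] using pv_per_tag t "fr" "wo" (by decide) (by decide)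
    · subst h
      rw [show (["fr", "en", "wo"].filter (· != "wo")) = ["fr", "en"] from by decide,
          show (["en", "fr", "wo"].filter (· != "wo")) = ["en", "fr"] from by decide]
      simp only [List.any_cons, List.any_nil, Bool.or_false, List.flatMap_cons, List.flatMap_nil,
                 List.cons_append, List.nil_append, List.append_nil]
      rw [pv_helper tags "fr" (by decide) (by decide), pv_helper tags "en" (by decide) (by decide)]
      refine pv_two_any (fun t => ?_) tags
      simp only [List.contains_cons, List.contains_nil, Bool.or_false]
      simpa only [Bool.or_assoc] using pv_per_tag' t "fr" "en" (by decide) (by decide)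
  · have hf : (["fr", "en", "wo"].contains l) = false := by simpa using hc
    rw [hf]
    rfl

-- ===== VERDICT (by name: the statement is the Claim_ definition above) =====
theorem tags_declare_other_language_py_spec : Claim_equal_tags_declare_other_language_py := by
  intro tags pl _
  exact pv_main tags (pyPrefLang pl)
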